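-- pv_equiv track=rewrite | github.com/jmwoffor/project_euler | p19.py | get_firsts
-- ===== SOURCE A (Python) =====
-- def is_leap_year(year):
--     if year % 100 == 0:
--         if year % 400 == 0:
--             return True
--         else:
--             return False
--     elif year % 4 == 0:
--         return True
--     else:
--         return False
--
-- def get_firsts(year):
--     firsts = [1,32] # starts with [1/1, 2/1]
--     if is_leap_year(year) == False: # handles Feb. leap years
--         firsts.append(firsts[1]+28)
--     else:
--         firsts.append(firsts[1]+29)
--     for i in range(2,11):
--         if i == 3 or i == 5 or i == 8 or i == 10: # for April, June, Sept. and November with 30 days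
--             firsts.append(firsts[i]+30)
--         else:
--             firsts.append(firsts[i]+31)
--     return firsts
-- ===== SOURCE B (Python) =====
-- def is_leap_year(year):
--     return year % 400 == 0 if year % 100 == 0 else year % 4 == 0
--
-- def get_firsts(year):
--     leap = is_leap_year(year)
--     return [(367 * m - 362) // 12 - (0 if m < 3 else 1 if leap else 2) + 1
--             for m in range(1, 13)]
-- ===== Notes on version B (the rewrite author's own statement) =====
-- stated objective: alternative
-- what changed: Replaces the stateful branching append loop (each first computed from the previous one) with an independent closed-form arithmetic formula (367*m-362)//12 per month plus a leap correction after February, so no cumulative state is kept.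
import Mathlib
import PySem

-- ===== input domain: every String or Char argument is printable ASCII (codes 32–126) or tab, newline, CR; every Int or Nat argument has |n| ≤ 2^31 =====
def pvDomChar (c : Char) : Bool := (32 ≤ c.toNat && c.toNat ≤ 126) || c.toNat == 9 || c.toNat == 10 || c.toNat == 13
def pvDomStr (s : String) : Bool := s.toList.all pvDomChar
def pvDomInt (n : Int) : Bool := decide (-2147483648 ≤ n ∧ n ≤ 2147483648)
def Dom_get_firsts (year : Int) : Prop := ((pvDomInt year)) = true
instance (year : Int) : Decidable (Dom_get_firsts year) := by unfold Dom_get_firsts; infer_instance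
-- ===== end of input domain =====

-- B computes each month's first day-of-year by the closed formula (367*m-362)//12
-- with a leap correction after February, instead of A's stateful branching append
-- loop (objective: alternative).


-- ===== PORT A =====
def is_leap_year (year : Int) : Bool :=
  if PySem.Int.mod year 100 == 0 then
    (if PySem.Int.mod year 400 == 0 then true else false)
  else if PySem.Int.mod year 4 == 0 then true else false

def get_firsts (year : Int) : List Int :=
  let firsts : List Int := [1, 32]
  -- list indexing firsts[i]: PySem.List.pyGet? (always in range here; .getD 0 unreachable)
  let firsts :=
    if (is_leap_year year == false) then
      firsts ++ [(PySem.List.pyGet? firsts 1).getD 0 + 28]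
    else
      firsts ++ [(PySem.List.pyGet? firsts 1).getD 0 + 29]
  (PySem.List.pyRange 2 11 1).foldl (fun firsts i =>
    if i == 3 || i == 5 || i == 8 || i == 10 then
      firsts ++ [(PySem.List.pyGet? firsts i).getD 0 + 30]
    else
      firsts ++ [(PySem.List.pyGet? firsts i).getD 0 + 31]) firsts

-- ===== PORT B =====
def is_leap_year_b (year : Int) : Bool :=
  if PySem.Int.mod year 100 == 0 then PySem.Int.mod year 400 == 0
  else PySem.Int.mod year 4 == 0

def get_firsts_alt (year : Int) : List Int :=
  let leap := is_leap_year_b year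
  (PySem.List.pyRange 1 13 1).map (fun m =>
    PySem.Int.floordiv (367 * m - 362) 12
      - (if m < 3 then 0 else if leap then 1 else 2) + 1)

-- ===== PRECONDITION & SPEC =====
def Spec_get_firsts (year : Int) (out : List Int) : Prop := out = get_firsts_alt year
instance (year : Int) (out : List Int) : Decidable (Spec_get_firsts year out) := by unfold Spec_get_firsts; infer_instance

-- ===== CLAIM (what is proved, stated in full; the proofs are below) =====
def Claim_equal_get_firsts : Prop := ∀ (year : Int), Dom_get_firsts year → Spec_get_firsts year (get_firsts year)

-- ===== LEMMAS AND PROOFS =====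
theorem leap_eq (year : Int) : is_leap_year year = is_leap_year_b year := by
  unfold is_leap_year is_leap_year_b
  split_ifs <;> simp_all

-- ===== VERDICT (by name: the statement is the Claim_ definition above) =====
theorem get_firsts_spec : Claim_equal_get_firsts := by
  intro year _
  unfold Spec_get_firsts get_firsts get_firsts_alt
  rw [leap_eq]
  cases is_leap_year_b year <;> decide
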